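-- pv_equiv track=rewrite | github.com/JeremyEB/TennosBussines | EjercicioTennos5.py | Ejercicio5_Programa
-- ===== SOURCE A (Python) =====
-- def Ejercicio5_Programa(array):
--     #Creamo la variable 'var_Fila', 'var_Columnas' y usamos la funcion len para obtener cantidad de
--     # elementos del array
--     var_Fila = len(array)
--     var_Columnas = len(array[0])
--     #Creamos una lista vacia que la llenaremos con el array
--     palabras = []
--     #Iteramos la variable var_Columnas
--     for i in range(var_Columnas):
--         #Creamos la variable palabra para llenar mediante la lista var_Fila
--         palabra = ''
--         for a in range (var_Fila):
--             if array[a][i] != '':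
--                 palabra += array[a][i]
--         #Utilizamos la funcion append para agregar a los arrays de la variable palabra a palabras
--         palabras.append(palabra)
--         #Retornamos un espacio entre palabras y unimos el array
--     return ' '.join(palabras)
-- ===== SOURCE B (Python) =====
-- def Ejercicio5_Programa(array):
--     # Row-major single pass: maintain one partial word per column and extend
--     # each with the current row's cell, instead of scanning per column.
--     words = [''] * len(array[0])
--     for row in array:
--         words = [w + row[i] for i, w in enumerate(words)]
--     return ' '.join(words)
-- ===== Notes on version B (the rewrite author's own statement) =====
-- stated objective: alternative
-- what changed: Traverses the grid row-major in a single pass, maintaining a list of partial words (one per column) that each row extends, instead of A's column-major nested loops that build each word separately; the redundant '' check disappears since appending '' is a no-op.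
import Mathlib
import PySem

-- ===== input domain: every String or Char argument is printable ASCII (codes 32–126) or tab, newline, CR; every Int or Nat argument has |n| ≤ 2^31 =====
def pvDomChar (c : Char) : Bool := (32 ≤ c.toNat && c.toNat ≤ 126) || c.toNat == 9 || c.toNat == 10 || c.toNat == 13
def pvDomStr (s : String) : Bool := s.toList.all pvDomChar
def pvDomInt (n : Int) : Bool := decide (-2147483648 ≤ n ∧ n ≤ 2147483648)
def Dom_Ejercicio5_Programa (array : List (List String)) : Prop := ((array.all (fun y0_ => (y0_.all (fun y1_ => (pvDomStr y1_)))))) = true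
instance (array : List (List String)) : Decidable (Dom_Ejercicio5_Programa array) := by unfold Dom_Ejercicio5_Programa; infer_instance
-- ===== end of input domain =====

-- B traverses the grid row-major in one pass, extending a list of partial words, instead of A's column-major nested loops (alternative, same cost).

-- ===== PORT A =====
-- array[0] / array[a][i] raise IndexError in Python; the port reads them with a default,
-- and Pre_ below excludes exactly the raising inputs.
def Ejercicio5_Programa (array : List (List String)) : String :=
  let varFila : Int := PySem.List.len array
  let varColumnas : Int := PySem.List.len ((PySem.List.pyGet? array 0).getD [])
  let palabras := (PySem.List.pyRange 0 varColumnas 1).foldl (fun palabras i =>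
    let palabra := (PySem.List.pyRange 0 varFila 1).foldl (fun palabra a =>
      let s := PySem.List.pyGetD (PySem.List.pyGetD array a []) i ""
      if s ≠ "" then palabra ++ s else palabra) ""
    palabras ++ [palabra]) []
  PySem.Str.join " " palabras

-- ===== PORT B =====
-- [''] * len(array[0]) → pyRepeat; row[i] is read with a default (Pre_ excludes the raising inputs).
def Ejercicio5_Programa_alt (array : List (List String)) : String :=
  let words := PySem.List.pyRepeat [""] (PySem.List.len ((PySem.List.pyGet? array 0).getD []))
  let words := array.foldl (fun ws row =>
    (PySem.List.enumerate ws 0).map (fun p => p.2 ++ PySem.List.pyGetD row p.1 "")) words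
  PySem.Str.join " " words

-- ===== PRECONDITION & SPEC =====
-- Exactly the inputs on which Python A returns: a nonempty array whose every row is at least
-- as long as the first row (otherwise array[0] or array[a][i] raises IndexError; B raises there too).
def Pre_Ejercicio5_Programa (array : List (List String)) : Prop :=
  array ≠ [] ∧ ∀ row ∈ array, (array.headD []).length ≤ row.length
instance (array : List (List String)) : Decidable (Pre_Ejercicio5_Programa array) := by
  unfold Pre_Ejercicio5_Programa; infer_instance
def pvWitness_Ejercicio5_Programa : List (List String) := [["ab", "c"], ["", "d"]]

def Spec_Ejercicio5_Programa (array : List (List String)) (out : String) : Prop := out = Ejercicio5_Programa_alt array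
instance (array : List (List String)) (out : String) : Decidable (Spec_Ejercicio5_Programa array out) := by unfold Spec_Ejercicio5_Programa; infer_instance

-- ===== CLAIM (what is proved, stated in full; the proofs are below) =====
def Claim_equal_Ejercicio5_Programa : Prop := ∀ (array : List (List String)), Dom_Ejercicio5_Programa array → Pre_Ejercicio5_Programa array → Spec_Ejercicio5_Programa array (Ejercicio5_Programa array)

-- ===== LEMMAS AND PROOFS =====

-- ''.join has the empty separator, so Chars.join with [] is flatten
theorem chars_join_nil_sep : ∀ (L : List (List Char)), PySem.Chars.join [] L = L.flatten
  | [] => by simp [PySem.Chars.join_nil]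
  | [p] => by simp [PySem.Chars.join, List.intercalate]
  | p :: q :: rest => by
      rw [PySem.Chars.join_cons_cons, chars_join_nil_sep (q :: rest)]; simp

-- A's inner row loop (skip-empty accumulator) computes ''.join of the column
theorem inner_fold_eq (i : Int) : ∀ (rows : List (List String)) (init : String),
    rows.foldl (fun p row =>
        let s := PySem.List.pyGetD row i ""
        if s ≠ "" then p ++ s else p) init
      = init ++ PySem.Str.join "" (rows.map (fun row => PySem.List.pyGetD row i ""))
  | [], init => by
      apply String.toList_injective
      simp [PySem.Str.join, PySem.Chars.join_nil]
  | r :: rs, init => by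
      simp only [List.foldl_cons, inner_fold_eq i rs]
      apply String.toList_injective
      simp only [String.toList_append, PySem.Str.toList_join, List.map_cons]
      split_ifs with h
      · simp [String.toList_append, chars_join_nil_sep]
      · have h0 : PySem.List.pyGetD r i "" = "" := by
          by_contra hc; exact h hc
        simp [h0, chars_join_nil_sep]

-- enumerating an index-preserving map re-pairs the original indices
theorem enum_map (g : Int × String → String) : ∀ (ws : List String) (s : Int),
    PySem.List.enumerate ((PySem.List.enumerate ws s).map g) s
      = (PySem.List.enumerate ws s).map (fun p => (p.1, g p))
  | [], s => by simp [PySem.List.enumerate_nil]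
  | w :: ws, s => by
      simp only [PySem.List.enumerate_cons, List.map_cons]
      rw [enum_map g ws (s + 1)]

-- B's row fold extends every partial word by its column's ''.join
theorem row_fold_eq : ∀ (rows : List (List String)) (ws : List String),
    rows.foldl (fun ws row =>
        (PySem.List.enumerate ws 0).map (fun p => p.2 ++ PySem.List.pyGetD row p.1 "")) ws
      = (PySem.List.enumerate ws 0).map
          (fun p => p.2 ++ PySem.Str.join "" (rows.map (fun row => PySem.List.pyGetD row p.1 "")))
  | [], ws => by
      apply List.ext_getElem
      · simp [PySem.List.length_enumerate]
      · intro k h1 h2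
        simp only [List.getElem_map, PySem.List.getElem_enumerate, List.map_nil]
        apply String.toList_injective
        simp [PySem.Str.join, PySem.Chars.join_nil]
  | r :: rs, ws => by
      simp only [List.foldl_cons]
      rw [row_fold_eq rs, enum_map, List.map_map]
      apply List.map_congr_left
      intro p _
      simp only [Function.comp]
      apply String.toList_injective
      simp [chars_join_nil_sep]

-- every cell of [''] * n reads back as '' (default and element coincide)
theorem pyGetD_replicate_empty (n : Nat) (j : Int) :
    PySem.List.pyGetD (List.replicate n "") j "" = "" := by
  unfold PySem.List.pyGetD
  cases h : PySem.List.pyGet? (List.replicate n ("" : String)) j with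
  | none => rfl
  | some x =>
      have := PySem.List.mem_of_pyGet?_eq_some _ h
      simp only [List.mem_replicate] at this
      simp [this.2]

-- ===== VERDICT (by name: the statement is the Claim_ definition above) =====
theorem Ejercicio5_Programa_spec : Claim_equal_Ejercicio5_Programa := by
  unfold Claim_equal_Ejercicio5_Programa
  intro array _ _
  unfold Spec_Ejercicio5_Programa Ejercicio5_Programa Ejercicio5_Programa_alt
  simp only []
  rw [PySem.List.foldl_append_singleton_eq_map
    (fun i => (PySem.List.pyRange 0 (PySem.List.len array) 1).foldl (fun palabra a =>
      let s := PySem.List.pyGetD (PySem.List.pyGetD array a []) i ""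
      if s ≠ "" then palabra ++ s else palabra) "")]
  simp only [List.nil_append]
  rw [row_fold_eq]
  congr 1
  rw [PySem.List.enumerate_eq_map_pyRange _ ""]
  rw [List.map_map]
  set cols : Int := PySem.List.len ((PySem.List.pyGet? array 0).getD []) with hcols
  have hnn : 0 ≤ cols := by rw [hcols]; simp [PySem.List.len]
  have hrep : PySem.List.pyRepeat [("" : String)] cols = List.replicate cols.toNat "" :=
    PySem.List.pyRepeat_singleton "" cols
  have hlen : PySem.List.len (PySem.List.pyRepeat [("" : String)] cols) = cols := by
    rw [hrep]; simp [PySem.List.len]; omega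
  rw [hlen]
  apply List.map_congr_left
  intro i _
  simp only [Function.comp]
  rw [hrep, pyGetD_replicate_empty]
  rw [PySem.List.foldl_pyRange_zero_pyGetD array ([] : List String)
    (fun p row => let s := PySem.List.pyGetD row i ""; if s ≠ "" then p ++ s else p) ""]
  rw [inner_fold_eq i array ""]
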